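-- pv_equiv track=rewrite | github.com/wawzysys/Algorithm | bishi/817网易雷火/2_1.py | find_violations
-- ===== SOURCE A (Python) =====
-- def find_violations(master_relationships, romantic_relationships):
--     master_to_disciples = {}
--     disciple_to_master = {}
--
--     for i in range(0, len(master_relationships), 2):
--         master = master_relationships[i]
--         disciple = master_relationships[i + 1]
--         if master not in master_to_disciples:
--             master_to_disciples[master] = []
--         master_to_disciples[master].append(disciple)
--         disciple_to_master[disciple] = master
--     romantic_pairs = []
--     for i in range(0, len(romantic_relationships), 2):
--         romantic_pairs.append(
--             (romantic_relationships[i], romantic_relationships[i + 1]))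
--
--     def find_generational_link(person, generations):
--         links = set()
--         queue = [(person, 0)]
--         while queue:
--             current, gen = queue.pop(0)
--             if gen < generations:
--                 if current in disciple_to_master:
--                     master = disciple_to_master[current]
--                     links.add(master)
--                     queue.append((master, gen + 1))
--         return links
--
--     violations = set()
--     for p1, p2 in romantic_pairs:
--
--         links_p1 = find_generational_link(p1, 3)
--         links_p2 = find_generational_link(p2, 3)
--
--         if p1 in links_p2 or p2 in links_p1:
--             violations.add(p1)
--             violations.add(p2)
--     return sorted(list(violations))
-- ===== SOURCE B (Python) =====
-- def find_violations(master_relationships, romantic_relationships):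
--     # direct master of each disciple
--     step = {master_relationships[i + 1]: master_relationships[i]
--             for i in range(0, len(master_relationships), 2)}
--     # bounded transitive closure: grandmaster and great-grandmaster maps by composition
--     g2 = {d: step[m] for d, m in step.items() if m in step}
--     g3 = {d: step[m] for d, m in g2.items() if m in step}
--     # ancestry-within-3-generations as one relation (set of ordered pairs)
--     anc = set(step.items()) | set(g2.items()) | set(g3.items())
--     out = set()
--     for i in range(0, len(romantic_relationships), 2):
--         p1, p2 = romantic_relationships[i], romantic_relationships[i + 1]
--         if (p1, p2) in anc or (p2, p1) in anc:
--             out.add(p1)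
--             out.add(p2)
--     return sorted(out)
-- ===== Notes on version B (the rewrite author's own statement) =====
-- stated objective: alternative
-- what changed: Instead of running a per-pair BFS that builds each partner's 3-generation ancestor set and testing membership, B precomputes the whole ancestry-within-3-generations relation once, by composing the disciple-to-master map with itself (grandmaster and great-grandmaster maps) and uniting their item sets into one set of ordered pairs; each romantic pair is then checked by two O(1) pair-membership tests, with no per-pair search and no dead master_to_disciples map.
import Mathlib
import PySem

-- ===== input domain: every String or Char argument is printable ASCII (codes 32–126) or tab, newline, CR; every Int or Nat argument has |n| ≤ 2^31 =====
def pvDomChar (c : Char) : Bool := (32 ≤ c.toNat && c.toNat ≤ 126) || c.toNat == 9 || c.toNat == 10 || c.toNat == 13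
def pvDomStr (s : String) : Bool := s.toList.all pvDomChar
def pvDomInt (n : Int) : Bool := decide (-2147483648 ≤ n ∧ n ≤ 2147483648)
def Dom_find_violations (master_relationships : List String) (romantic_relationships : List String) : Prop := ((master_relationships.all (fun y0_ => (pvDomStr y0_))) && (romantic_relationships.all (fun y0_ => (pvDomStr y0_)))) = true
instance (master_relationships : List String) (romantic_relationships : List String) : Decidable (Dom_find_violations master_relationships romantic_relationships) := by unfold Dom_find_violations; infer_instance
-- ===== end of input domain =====

-- B replaces A's per-pair queue-and-set BFS by ONE precomputed ancestry relation (the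
-- disciple-to-master map composed with itself twice, united as a set of ordered pairs),
-- so each romantic pair is checked by two pair-membership tests; alternative, same cost.


-- ===== PORT A =====
-- BFS of A's inner find_generational_link: queue of (person, gen), pop(0) from the front,
-- push the master at the back, collect masters into a set.  The fuel argument only makes the
-- while-loop total: called with fuel 4, the queue never holds more than one element and gen
-- strictly increases, so the queue is empty before fuel runs out.
def fglA (d2m : PySem.Dict String String) (generations : Int) :
    List (String × Int) → PySem.Set String → Nat → PySem.Set String
  | [], links, _ => links
  | _, links, 0 => links
  | (current, gen) :: rest, links, Nat.succ fuel =>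
      if gen < generations then
        match d2m.get? current with
        | some master =>
            fglA d2m generations (rest ++ [(master, gen + 1)]) (PySem.Set.add links master) fuel
        | none => fglA d2m generations rest links fuel
      else fglA d2m generations rest links fuel

-- pyGetD with default "" is the total form of m[i] / m[i+1]; exact under Pre_ (even length
-- makes every index i, i+1 drawn from range(0, len, 2) in range).
def find_violations (master_relationships : List String) (romantic_relationships : List String) : List String :=
  let st := (PySem.List.pyRange 0 (master_relationships.length : Int) 2).foldl
    (fun (st : PySem.Dict String (List String) × PySem.Dict String String) i =>
      let master := PySem.List.pyGetD master_relationships i ""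
      let disciple := PySem.List.pyGetD master_relationships (i + 1) ""
      let m2d := if st.1.contains master then st.1 else st.1.insert master []
      (m2d.modify master [] (fun l => l ++ [disciple]), st.2.insert disciple master))
    (PySem.Dict.empty, PySem.Dict.empty)
  let romantic_pairs := (PySem.List.pyRange 0 (romantic_relationships.length : Int) 2).foldl
    (fun acc i => acc ++ [(PySem.List.pyGetD romantic_relationships i "",
                           PySem.List.pyGetD romantic_relationships (i + 1) "")]) []
  let violations := romantic_pairs.foldl
    (fun v p =>
      let links1 := fglA st.2 3 [(p.1, 0)] PySem.Set.empty 4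
      let links2 := fglA st.2 3 [(p.2, 0)] PySem.Set.empty 4
      if PySem.Set.contains links2 p.1 || PySem.Set.contains links1 p.2 then
        PySem.Set.add (PySem.Set.add v p.1) p.2
      else v) PySem.Set.empty
  PySem.List.sorted violations (fun x => x) false

-- ===== PORT B =====
-- Source B's dict comprehension {d: step[m] for d, m in frontier.items() if m in step}:
-- a dict built by inserting, over frontier's items in order, each pair that survives the
-- filter; 'if m in step then step[m]' is the filter + getD (total since contains holds).
def composeStepB (step frontier : PySem.Dict String String) : PySem.Dict String String :=
  PySem.Dict.ofList (((frontier.items.filter (fun p => step.contains p.2)).map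
    (fun p => (p.1, step.getD p.2 ""))))

def find_violations_alt (master_relationships : List String) (romantic_relationships : List String) : List String :=
  let step := (PySem.List.pyRange 0 (master_relationships.length : Int) 2).foldl
    (fun (d : PySem.Dict String String) i =>
      d.insert (PySem.List.pyGetD master_relationships (i + 1) "")
               (PySem.List.pyGetD master_relationships i "")) PySem.Dict.empty
  let g2 := composeStepB step step
  let g3 := composeStepB step g2
  let anc := PySem.Set.update (PySem.Set.update (PySem.Set.ofList step.items) g2.items) g3.items
  let out := (PySem.List.pyRange 0 (romantic_relationships.length : Int) 2).foldl
    (fun (v : PySem.Set String) i =>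
      let p1 := PySem.List.pyGetD romantic_relationships i ""
      let p2 := PySem.List.pyGetD romantic_relationships (i + 1) ""
      if PySem.Set.contains anc (p1, p2) || PySem.Set.contains anc (p2, p1) then
        PySem.Set.add (PySem.Set.add v p1) p2
      else v) PySem.Set.empty
  PySem.List.sorted out (fun x => x) false

-- ===== PRECONDITION & SPEC =====
-- Pre_ excludes odd-length master or romantic lists, on which both A and B raise IndexError
-- at index i+1 of the last range step.
def Pre_find_violations (master_relationships : List String) (romantic_relationships : List String) : Prop :=
  master_relationships.length % 2 = 0 ∧ romantic_relationships.length % 2 = 0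
instance (master_relationships : List String) (romantic_relationships : List String) : Decidable (Pre_find_violations master_relationships romantic_relationships) := by unfold Pre_find_violations; infer_instance

def pvWitness_find_violations : List String × List String := (["m", "d"], ["d", "m"])

def Spec_find_violations (master_relationships : List String) (romantic_relationships : List String) (out : List String) : Prop := out = find_violations_alt master_relationships romantic_relationships
instance (master_relationships : List String) (romantic_relationships : List String) (out : List String) : Decidable (Spec_find_violations master_relationships romantic_relationships out) := by unfold Spec_find_violations; infer_instance

-- ===== CLAIM (what is proved, stated in full; the proofs are below) =====
def Claim_equal_find_violations : Prop := ∀ (master_relationships : List String) (romantic_relationships : List String), Dom_find_violations master_relationships romantic_relationships → Pre_find_violations master_relationships romantic_relationships → Spec_find_violations master_relationships romantic_relationships (find_violations master_relationships romantic_relationships)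

-- ===== LEMMAS AND PROOFS =====

-- the second component of A's two-dict fold evolves independently of the first
lemma snd_foldl_pair {α β γ : Type} (F : β → α → β) (G : γ → α → γ) :
    ∀ (l : List α) (st : β × γ),
      (l.foldl (fun st i => (F st.1 i, G st.2 i)) st).2 = l.foldl G st.2 := by
  intro l
  induction l with
  | nil => intro st; rfl
  | cons x rest ih => intro st; simp only [List.foldl_cons]; exact ih _

-- membership in the items of Source B's composed dict
lemma mem_items_comp (d fr : PySem.Dict String String) (hfr : fr.keys.Nodup) (x t : String) :
    (x, t) ∈ (composeStepB d fr).items ↔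
      ∃ mm, (x, mm) ∈ fr.items ∧ d.get? mm = some t := by
  have hkeys : ((fr.items.filter (fun p => d.contains p.2)).map
      (fun p : String × String => (p.1, d.getD p.2 ""))).map Prod.fst |>.Nodup := by
    have h1 : ((fr.items.filter (fun p => d.contains p.2)).map
        (fun p : String × String => (p.1, d.getD p.2 ""))).map Prod.fst
        = (fr.items.filter (fun p => d.contains p.2)).map Prod.fst := by
      simp [List.map_map, Function.comp]
    rw [h1]
    have hsub : ((fr.items.filter (fun p => d.contains p.2)).map Prod.fst).Sublist
        (fr.items.map Prod.fst) := List.Sublist.map Prod.fst List.filter_sublist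
    exact hsub.nodup (by simpa [PySem.Dict.keys] using hfr)
  have hitems : (composeStepB d fr).items
      = (fr.items.filter (fun p => d.contains p.2)).map
          (fun p : String × String => (p.1, d.getD p.2 "")) := by
    unfold composeStepB PySem.Dict.ofList PySem.Dict.update
    have := PySem.Dict.items_foldl_insert_fresh
      ((fr.items.filter (fun p => d.contains p.2)).map
        (fun p : String × String => (p.1, d.getD p.2 "")))
      Prod.fst Prod.snd PySem.Dict.empty
      (fun a _ => by simp [PySem.Dict.contains_empty]) hkeys
    simpa using this
  rw [hitems]
  simp only [List.mem_map, List.mem_filter, Prod.mk.injEq]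
  constructor
  · rintro ⟨p, ⟨hp, hc⟩, hx, ht⟩
    rw [PySem.Dict.contains_eq_isSome_get?] at hc
    rcases hg : d.get? p.2 with _ | w
    · rw [hg] at hc; simp at hc
    · refine ⟨p.2, ?_, ?_⟩
      · rw [← hx, Prod.mk.eta]; exact hp
      · rw [PySem.Dict.getD_of_get?_eq_some d "" hg] at ht; rw [← ht]; exact hg
  · rintro ⟨mm, hp, hg⟩
    refine ⟨(x, mm), ⟨hp, ?_⟩, rfl, ?_⟩
    · rw [PySem.Dict.contains_eq_isSome_get?, hg]; rfl
    · exact PySem.Dict.getD_of_get?_eq_some d "" hg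

-- the composed dict keeps keys unique
lemma nodup_keys_comp (d fr : PySem.Dict String String) :
    (composeStepB d fr).keys.Nodup := by
  unfold composeStepB PySem.Dict.ofList PySem.Dict.update
  exact PySem.Dict.nodup_keys_foldl_insert_key _ Prod.fst (fun d p => p.2) PySem.Dict.empty
    PySem.Dict.nodup_keys_empty

-- membership in B's precomputed ancestry relation is the 1-, 2- or 3-step chain equation
lemma contains_anc_iff (d : PySem.Dict String String) (hd : d.keys.Nodup) (x t : String) :
    PySem.Set.contains
      (PySem.Set.update (PySem.Set.update (PySem.Set.ofList d.items)
        (composeStepB d d).items) (composeStepB d d |> composeStepB d).items) (x, t) = true ↔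
      (d.get? x = some t ∨ (d.get? x).bind d.get? = some t ∨
        ((d.get? x).bind d.get?).bind d.get? = some t) := by
  rw [PySem.Set.contains_iff, PySem.Set.mem_update, PySem.Set.mem_update, PySem.Set.mem_ofList]
  have h1 : (x, t) ∈ d.items ↔ d.get? x = some t :=
    (PySem.Dict.get?_eq_some_iff_mem_items d x t hd).symm
  have h2 : ∀ u, (x, u) ∈ (composeStepB d d).items ↔ (d.get? x).bind d.get? = some u := by
    intro u
    rw [mem_items_comp d d hd]
    constructor
    · rintro ⟨mm, hp, hg⟩
      rw [(PySem.Dict.get?_eq_some_iff_mem_items d x mm hd).mpr hp, Option.bind_some]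
      exact hg
    · intro h
      rcases hg : d.get? x with _ | m1
      · rw [hg] at h; simp at h
      · rw [hg, Option.bind_some] at h
        exact ⟨m1, (PySem.Dict.get?_eq_some_iff_mem_items d x m1 hd).mp hg, h⟩
  have h3 : (x, t) ∈ (composeStepB d (composeStepB d d)).items ↔
      ((d.get? x).bind d.get?).bind d.get? = some t := by
    rw [mem_items_comp d _ (nodup_keys_comp d d)]
    constructor
    · rintro ⟨mm, hp, hg⟩
      have hmid : (d.get? x).bind d.get? = some mm := (h2 mm).mp hp
      rw [hmid, Option.bind_some]; exact hg
    · intro h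
      rcases hg : (d.get? x).bind d.get? with _ | m2
      · rw [hg] at h; simp at h
      · rw [hg, Option.bind_some] at h
        refine ⟨m2, ?_, h⟩
        rcases hg1 : d.get? x with _ | m1
        · rw [hg1] at hg; simp at hg
        · rw [hg1, Option.bind_some] at hg
          exact (mem_items_comp d d hd x m2).mpr ⟨m1,
            (PySem.Dict.get?_eq_some_iff_mem_items d x m1 hd).mp hg1, hg⟩
  rw [h1, h2 t, h3]
  tauto

-- membership in A's BFS ancestor set is the same chain equation
lemma contains_fglA_iff (d : PySem.Dict String String) (x t : String) :
    PySem.Set.contains (fglA d 3 [(x, 0)] PySem.Set.empty 4) t = true ↔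
      (d.get? x = some t ∨ (d.get? x).bind d.get? = some t ∨
        ((d.get? x).bind d.get?).bind d.get? = some t) := by
  rcases h1 : d.get? x with _ | m1
  · simp [fglA, h1, PySem.Set.empty, PySem.Set.contains]
  · rcases h2 : d.get? m1 with _ | m2
    · simp only [fglA, h1]
      norm_num [fglA, h2, PySem.Set.empty, PySem.Set.contains, PySem.Set.add,
        List.contains_eq_mem]
      aesop
    · rcases h3 : d.get? m2 with _ | m3
      · simp only [fglA, h1]
        norm_num [fglA, h2, h3, PySem.Set.empty, PySem.Set.contains, PySem.Set.add,
          List.contains_eq_mem]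
        split_ifs <;> aesop
      · simp only [fglA, h1]
        norm_num [fglA, h2, h3, PySem.Set.empty, PySem.Set.contains, PySem.Set.add,
          List.contains_eq_mem]
        split_ifs <;> aesop

-- ===== VERDICT (by name: the statement is the Claim_ definition above) =====
theorem find_violations_spec : Claim_equal_find_violations := by
  intro m r _ _
  unfold Spec_find_violations find_violations find_violations_alt
  dsimp only
  rw [snd_foldl_pair
    (fun (d1 : PySem.Dict String (List String)) (i : Int) =>
      (if d1.contains (PySem.List.pyGetD m i "") then d1
       else d1.insert (PySem.List.pyGetD m i "") []).modify (PySem.List.pyGetD m i "") []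
        (fun l => l ++ [PySem.List.pyGetD m (i + 1) ""]))
    (fun (d2 : PySem.Dict String String) (i : Int) =>
      d2.insert (PySem.List.pyGetD m (i + 1) "") (PySem.List.pyGetD m i ""))]
  -- A's disciple_to_master dict is B's step dict; name it d
  set d := (PySem.List.pyRange 0 (m.length : Int) 2).foldl
    (fun (d : PySem.Dict String String) i =>
      d.insert (PySem.List.pyGetD m (i + 1) "") (PySem.List.pyGetD m i "")) PySem.Dict.empty with hd
  have hnd : d.keys.Nodup := by
    rw [hd]
    exact PySem.Dict.nodup_keys_foldl_insert_key _ _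
      (fun d i => PySem.List.pyGetD m i "") PySem.Dict.empty PySem.Dict.nodup_keys_empty
  -- A's romantic_pairs list is the mapped range, so its fold is a fold over the range
  rw [PySem.List.foldl_append_singleton_eq_map
    (fun i => (PySem.List.pyGetD r i "", PySem.List.pyGetD r (i + 1) "")), List.nil_append,
    List.foldl_map]
  -- per range index, A's build-then-test condition is B's relation membership
  refine congrArg (fun s => PySem.List.sorted s (fun x => x) false) ?_
  apply List.foldl_ext
  intro v i hi
  have e1 : PySem.Set.contains (fglA d 3 [(PySem.List.pyGetD r (i + 1) "", 0)] PySem.Set.empty 4)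
      (PySem.List.pyGetD r i "")
      = PySem.Set.contains
        (PySem.Set.update (PySem.Set.update (PySem.Set.ofList d.items)
          (composeStepB d d).items) (composeStepB d (composeStepB d d)).items)
        (PySem.List.pyGetD r (i + 1) "", PySem.List.pyGetD r i "") := by
    rw [Bool.eq_iff_iff, contains_fglA_iff, contains_anc_iff d hnd]
  have e2 : PySem.Set.contains (fglA d 3 [(PySem.List.pyGetD r i "", 0)] PySem.Set.empty 4)
      (PySem.List.pyGetD r (i + 1) "")
      = PySem.Set.contains
        (PySem.Set.update (PySem.Set.update (PySem.Set.ofList d.items)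
          (composeStepB d d).items) (composeStepB d (composeStepB d d)).items)
        (PySem.List.pyGetD r i "", PySem.List.pyGetD r (i + 1) "") := by
    rw [Bool.eq_iff_iff, contains_fglA_iff, contains_anc_iff d hnd]
  rw [e1, e2, Bool.or_comm]
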